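-- pv_equiv track=rewrite | github.com/02alexander/aoc2023 | day13/main.py | sym
-- ===== SOURCE A (Python) =====
-- def sym(line):
--     s = set()
--     for i in range(1, len(line)):
--         k = 1
--         is_sym = True
--         while i-k >= 0 and i+k-1 < len(line):
--             if line[i-k] != line[i+k-1]:
--                 is_sym = False
--             k += 1
--         if is_sym:
--             s.add(i)
--     return s
-- ===== SOURCE B (Python) =====
-- def sym(line):
--     n = len(line)
--     return {i for i in range(1, n)
--             if line[max(0, 2 * i - n):i] == line[i:2 * i][::-1]}
-- ===== Notes on version B (the rewrite author's own statement) =====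
-- stated objective: faster
-- what changed: Replaced the per-center char-by-char inner while loop (which never breaks early) by a single slice comparison per center: the reversed prefix chunk up to i must equal the suffix chunk from i, of length min(i, n-i).
import Mathlib
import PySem

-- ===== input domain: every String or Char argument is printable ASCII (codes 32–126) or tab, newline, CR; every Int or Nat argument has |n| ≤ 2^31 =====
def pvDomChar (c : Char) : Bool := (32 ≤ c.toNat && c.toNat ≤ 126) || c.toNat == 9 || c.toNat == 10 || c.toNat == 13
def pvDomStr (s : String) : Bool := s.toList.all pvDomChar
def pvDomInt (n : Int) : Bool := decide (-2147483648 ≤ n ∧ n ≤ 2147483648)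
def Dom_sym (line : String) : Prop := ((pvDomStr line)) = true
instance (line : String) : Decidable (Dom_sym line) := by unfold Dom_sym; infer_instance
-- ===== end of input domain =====

-- B replaces A's per-center char-by-char inner while loop (which has no early exit)
-- by a single slice comparison per center; a timing run measured B faster (constant factor).

-- ===== PORT A =====
-- the inner 'while i-k >= 0 and i+k-1 < len(line)' loop, transliterated
def symWhile (cs : List Char) (n i k : Int) (isSym : Bool) : Bool :=
  if 0 ≤ i - k ∧ i + k - 1 < n then
    symWhile cs n i (k + 1)
      (if PySem.List.pyGet? cs (i - k) ≠ PySem.List.pyGet? cs (i + k - 1) then false else isSym)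
  else isSym
termination_by (i - k + 1).toNat
decreasing_by omega

def sym (line : String) : List Int :=
  let cs := line.toList
  let n : Int := (cs.length : Int)
  (PySem.List.pyRange 1 n 1).foldl
    (fun s i => if symWhile cs n i 1 true then PySem.Set.add s i else s)
    PySem.Set.empty

-- ===== PORT B =====
-- {i for i in range(1, n) if line[max(0, 2*i-n):i] == line[i:2*i][::-1]}
-- ('[::-1]' ported as .reverse, cf. PySem.List.slice?_none_none_neg_one)
def sym_alt (line : String) : List Int :=
  let cs := line.toList
  let n : Int := (cs.length : Int)
  PySem.Set.ofList ((PySem.List.pyRange 1 n 1).filter (fun i =>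
    PySem.List.slice cs (some (max 0 (2 * i - n))) (some i)
      == (PySem.List.slice cs (some i) (some (2 * i))).reverse))

-- ===== PRECONDITION & SPEC =====
def Spec_sym (line : String) (out : List Int) : Prop := out = sym_alt line
instance (line : String) (out : List Int) : Decidable (Spec_sym line out) := by unfold Spec_sym; infer_instance

-- ===== CLAIM (what is proved, stated in full; the proofs are below) =====
def Claim_equal_sym : Prop := ∀ (line : String), Dom_sym line → Spec_sym line (sym line)

-- ===== LEMMAS AND PROOFS =====

-- folding 'if p i then add else skip' is filtering then folding add
theorem foldl_add_if_eq_filter {p : Int → Bool} (xs : List Int) (s : List Int) :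
    xs.foldl (fun s i => if p i then PySem.Set.add s i else s) s
      = (xs.filter p).foldl PySem.Set.add s := by
  induction xs generalizing s with
  | nil => rfl
  | cons x xs ih =>
    simp only [List.foldl_cons, List.filter_cons]
    by_cases h : p x <;> simp [h, ih]

-- characterisation of A's inner loop: true iff all mirrored pairs inside the line match
theorem symWhile_iff (cs : List Char) (n i k : Int) (b : Bool) :
    symWhile cs n i k b = true ↔
      (b = true ∧ ∀ j : Int, k ≤ j → 0 ≤ i - j → i + j - 1 < n →
        PySem.List.pyGet? cs (i - j) = PySem.List.pyGet? cs (i + j - 1)) := by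
  fun_induction symWhile cs n i k b with
  | case1 k b h ih =>
    rw [dite_eq_ite] at ih
    rw [ih]
    constructor
    · rintro ⟨hb, hrest⟩
      by_cases hg : PySem.List.pyGet? cs (i - k) ≠ PySem.List.pyGet? cs (i + k - 1)
      · simp [hg] at hb
      · rw [if_neg hg] at hb
        rw [not_not] at hg
        refine ⟨hb, fun j hj h1 h2 => ?_⟩
        rcases eq_or_lt_of_le hj with rfl | hlt
        · exact hg
        · exact hrest j (by omega) h1 h2
    · rintro ⟨hb, hall⟩
      have hk := hall k le_rfl (by omega) (by omega)
      refine ⟨by simp [hk, hb], fun j hj h1 h2 => hall j (by omega) h1 h2⟩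
  | case2 k b h =>
    constructor
    · intro hb
      exact ⟨hb, fun j hj h1 h2 => absurd ⟨by omega, by omega⟩ h⟩
    · exact fun ⟨hb, _⟩ => hb

-- Nat-level core: segment [I-M, I) equals reverse of segment [I, I+M) iff mirrored pairs match
theorem seg_core (cs : List Char) (I M : Nat) (hMI : M ≤ I) (_hMN : I + M ≤ cs.length)
    (hM : M = min I (cs.length - I)) :
    ((cs.drop (I - M)).take M = ((cs.drop I).take I).reverse ↔
      ∀ t : Nat, t < M → cs[I - M + t]? = cs[I + (M - 1 - t)]?) := by
  have hlen2 : ((cs.drop I).take I).length = M := by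
    simp [List.length_take, List.length_drop]; omega
  constructor
  · intro he t ht
    have := congrArg (fun l => l[t]?) he
    simp only at this
    rw [List.getElem?_take_of_lt ht, List.getElem?_drop] at this
    rw [List.getElem?_reverse (by rw [hlen2]; exact ht), hlen2] at this
    rw [List.getElem?_take_of_lt (by omega), List.getElem?_drop] at this
    simpa using this
  · intro hp
    apply List.ext_getElem?
    intro t
    by_cases ht : t < M
    · rw [List.getElem?_take_of_lt ht, List.getElem?_drop]
      rw [List.getElem?_reverse (by rw [hlen2]; exact ht), hlen2]
      rw [List.getElem?_take_of_lt (by omega), List.getElem?_drop]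
      exact hp t ht
    · rw [List.getElem?_eq_none (by simp [List.length_take, List.length_drop]; omega),
          List.getElem?_eq_none (by rw [List.length_reverse, hlen2]; omega)]

-- B's slice comparison says exactly the same thing
theorem slice_eq_iff (cs : List Char) (i : Int) (h1 : 1 ≤ i) (h2 : i < (cs.length : Int)) :
    (PySem.List.slice cs (some (max 0 (2 * i - (cs.length : Int)))) (some i)
       == (PySem.List.slice cs (some i) (some (2 * i))).reverse) = true ↔
      (∀ j : Int, 1 ≤ j → 0 ≤ i - j → i + j - 1 < (cs.length : Int) →
        PySem.List.pyGet? cs (i - j) = PySem.List.pyGet? cs (i + j - 1)) := by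
  set N := cs.length with hN
  set I := i.toNat with hI
  set M := min I (N - I) with hM
  have hIi : (I : Int) = i := by omega
  have hIN : I < N := by omega
  have hI1 : 1 ≤ I := by omega
  have hmax : max 0 (2 * i - (N : Int)) = ((I - M : Nat) : Int) := by omega
  rw [hmax, PySem.List.slice_toNat _ (by positivity) (by omega),
      PySem.List.slice_toNat _ (by omega) (by omega)]
  have e1 : ((((I - M : Nat) : Int)).toNat) = I - M := by omega
  have e2 : i.toNat - (I - M) = M := by omega
  have e3 : (2 * i).toNat - i.toNat = I := by omega
  rw [e1, e2, e3, ← hI]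
  rw [beq_iff_eq]
  rw [seg_core cs I M (by omega) (by omega) hM]
  constructor
  · intro hp j hj1 hj2 hj3
    have hjM : j.toNat ≤ M := by omega
    have ht := hp (M - j.toNat) (by omega)
    rw [PySem.List.pyGet?_of_nonneg (h := hj2), PySem.List.pyGet?_of_nonneg (h := by omega)]
    have a1 : I - M + (M - j.toNat) = (i - j).toNat := by omega
    have a2 : I + (M - 1 - (M - j.toNat)) = (i + j - 1).toNat := by omega
    rw [a1, a2] at ht
    exact ht
  · intro hp t ht
    have hj := hp ((M - t : Nat) : Int) (by omega) (by omega) (by omega)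
    rw [PySem.List.pyGet?_of_nonneg (h := by omega), PySem.List.pyGet?_of_nonneg (h := by omega)] at hj
    have a1 : (i - ((M - t : Nat) : Int)).toNat = I - M + t := by omega
    have a2 : (i + ((M - t : Nat) : Int) - 1).toNat = I + (M - 1 - t) := by omega
    rw [a1, a2] at hj
    exact hj

-- ===== VERDICT (by name: the statement is the Claim_ definition above) =====
theorem sym_spec : Claim_equal_sym := by
  intro line _
  unfold Spec_sym sym sym_alt
  simp only
  rw [PySem.Set.ofList_eq_foldl, foldl_add_if_eq_filter]
  congr 1
  apply List.filter_congr
  intro i hi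
  rw [PySem.List.mem_pyRange_one] at hi
  rw [Bool.eq_iff_iff, symWhile_iff, slice_eq_iff _ _ hi.1 hi.2]
  simp only [true_and]
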